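-- pv_equiv track=rewrite | github.com/MalikAza/fraocme | fraocme/graph/analysis.py | find_critical_nodes
-- ===== SOURCE A (Python) =====
-- def enumerate_all_paths(
--     graph: dict[str, list[str]], start: str, end: str, max_paths: int | None = None
-- ) -> list[list[str]]:
--     """
--     Enumerate all paths from start to end.
--
--     WARNING: Can be exponentially many paths!
--     Use `count_paths_dag` if you only need the path count.
--
--     Args:
--         graph: Adjacency list
--         start: Starting node
--         end: Ending node
--         max_paths: Optional limit on paths to return (for safety)
--
--     Returns:
--         List of paths, where each path is a list of nodes
--
--     Example:
--         >>> enumerate_all_paths(graph, 'you', 'out')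
--         [['you', 'bbb', 'ddd', 'ggg', 'out'], ['you', 'bbb', 'eee', 'out'], ...]
--     """
--     all_paths = []
--
--     def dfs(node: str, path: list[str]):
--         if max_paths and len(all_paths) >= max_paths:
--             return
--
--         if node == end:
--             all_paths.append(path[:])
--             return
--
--         for neighbor in graph.get(node, []):
--             if neighbor not in path:  # Avoid cycles
--                 path.append(neighbor)
--                 dfs(neighbor, path)
--                 path.pop()
--
--     dfs(start, [start])
--     return all_paths
--
-- def find_critical_nodes(graph: dict[str, list[str]], start: str, end: str) -> set[str]:
--     """
--     Find nodes that appear in ALL paths from start to end.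
--     These are "critical" - if they fail, no path exists.
--
--     Example:
--         >>> find_critical_nodes(graph, 'you', 'out')
--         {'you', 'out'}  # These must appear in every path
--     """
--     all_paths = enumerate_all_paths(graph, start, end)
--     if not all_paths:
--         return set()
--
--     # Intersection of all paths
--     critical = set(all_paths[0])
--     for path in all_paths[1:]:
--         critical &= set(path)
--
--     return critical
-- ===== SOURCE B (Python) =====
-- def find_critical_nodes(graph: dict[str, list[str]], start: str, end: str) -> set[str]:
--     """Critical nodes = nodes on every start->end path, computed without
--     enumerating all paths: find ONE simple path, then test each of its nodes
--     by removing it and checking whether end is still reachable from start."""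
--     path = _first_path(graph, start, end)
--     if path is None:
--         return set()
--     critical = set()
--     for node in path:
--         if node == start or node == end or not _reachable_avoiding(graph, start, end, node):
--             critical.add(node)
--     return critical
--
--
-- def _first_path(graph, start, end):
--     def dfs(node, path):
--         if node == end:
--             return list(path)
--         for neighbor in graph.get(node, []):
--             if neighbor not in path:
--                 path.append(neighbor)
--                 found = dfs(neighbor, path)
--                 path.pop()
--                 if found is not None:
--                     return found
--         return None
--     return dfs(start, [start])
--
--
-- def _reachable_avoiding(graph, start, end, banned):
--     queue = [start]
--     visited = set()
--     while queue:
--         node = queue.pop(0)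
--         if node == end:
--             return True
--         if node in visited or node == banned:
--             continue
--         visited.add(node)
--         queue.extend(graph.get(node, []))
--     return False
-- ===== Notes on version B (the rewrite author's own statement) =====
-- stated objective: alternative
-- what changed: B finds one DFS path and tests each of its nodes by a removal + BFS reachability check (s-t cut-vertex characterisation) instead of enumerating all simple paths and intersecting them; worst-case cost differs (A is exponential in the number of simple paths) but on the benchmark inputs both run at the same speed.
import Mathlib
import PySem

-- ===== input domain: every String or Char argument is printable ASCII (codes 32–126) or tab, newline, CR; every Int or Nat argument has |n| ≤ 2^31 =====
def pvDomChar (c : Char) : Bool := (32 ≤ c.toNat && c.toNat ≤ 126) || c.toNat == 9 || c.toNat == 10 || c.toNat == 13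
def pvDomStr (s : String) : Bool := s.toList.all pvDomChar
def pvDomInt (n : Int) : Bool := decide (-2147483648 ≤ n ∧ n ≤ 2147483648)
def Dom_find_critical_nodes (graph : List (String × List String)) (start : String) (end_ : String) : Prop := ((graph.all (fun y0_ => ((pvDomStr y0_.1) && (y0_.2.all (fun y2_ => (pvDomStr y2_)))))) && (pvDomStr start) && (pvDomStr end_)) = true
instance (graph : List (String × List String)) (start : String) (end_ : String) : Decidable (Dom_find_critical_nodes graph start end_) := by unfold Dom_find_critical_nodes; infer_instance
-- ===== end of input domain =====

-- B finds one DFS path and tests each of its nodes by a removal + BFS reachability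
-- check (the classic s-t cut-vertex characterisation) instead of enumerating all
-- simple paths and intersecting them.

-- ===== PORT A =====
-- graph.get(node, []) : dict lookup (first matching key), shared by both ports
def pvAdj (graph : List (String × List String)) (node : String) : List String :=
  (PySem.Dict.mk graph).getD node []

-- multiset of all neighbour-list entries (termination measure only)
def pvTgts (graph : List (String × List String)) : List String :=
  (graph.map Prod.snd).flatten

theorem pvAdj_subset_tgts (graph : List (String × List String)) (node : String) :
    ∀ x ∈ pvAdj graph node, x ∈ pvTgts graph := by
  intro x hx
  unfold pvAdj PySem.Dict.getD PySem.Dict.get? at hx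
  unfold pvTgts
  cases hfind : List.find? (fun p => p.1 == node) (PySem.Dict.mk graph).items with
  | none => simp [hfind] at hx
  | some pr =>
      simp only [hfind, Option.map_some, Option.getD_some] at hx
      have hmem : pr ∈ graph := List.mem_of_find?_eq_some hfind
      exact List.mem_flatten.2 ⟨pr.2, List.mem_map.2 ⟨pr, hmem, rfl⟩, hx⟩

theorem pv_filter_lt {l path : List String} {n : String}
    (hn : n ∈ l) (hnp : n ∉ path) :
    (l.filter (fun x => x ∉ path ++ [n])).length < (l.filter (fun x => x ∉ path)).length := by
  have hsub : (l.filter (fun x => decide (x ∉ path ++ [n]))).Sublist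
      (l.filter (fun x => decide (x ∉ path))) := by
    apply List.monotone_filter_right
    intro x hx
    simp only [decide_eq_true_eq, List.mem_append, List.mem_singleton] at hx ⊢
    exact fun h => hx (Or.inl h)
  rcases Nat.lt_or_ge (l.filter (fun x => decide (x ∉ path ++ [n]))).length
      (l.filter (fun x => decide (x ∉ path))).length with h | h
  · exact h
  · exfalso
    have heq := hsub.eq_of_length (Nat.le_antisymm hsub.length_le h)
    have h1 : n ∈ l.filter (fun x => decide (x ∉ path)) := by
      simp [List.mem_filter, hn, hnp]
    rw [← heq] at h1
    simp [List.mem_filter] at h1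

mutual
-- inner dfs of enumerate_all_paths (the shared all_paths list threaded as acc;
-- maxPaths is the helper's optional cutoff — None in find_critical_nodes' call)
def pvDfsA (graph : List (String × List String)) (end_ : String) (maxPaths : Option Int)
    (node : String) (path : List String) (acc : List (List String)) : List (List String) :=
  if (match maxPaths with
      | none => false
      | some m => decide (m ≠ 0) && decide ((acc.length : Int) ≥ m)) then acc
  else if node = end_ then acc ++ [path]
  else pvDfsALoop graph end_ maxPaths (pvAdj graph node) path acc (pvAdj_subset_tgts graph node)
termination_by (((pvTgts graph).filter (fun x => x ∉ path)).length, 1, 0)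
decreasing_by
  exact Prod.Lex.right _ (Prod.Lex.left _ _ (by omega))

def pvDfsALoop (graph : List (String × List String)) (end_ : String) (maxPaths : Option Int)
    (nbs : List String) (path : List String) (acc : List (List String))
    (h : ∀ x ∈ nbs, x ∈ pvTgts graph) : List (List String) :=
  match nbs with
  | [] => acc
  | nb :: rest =>
      if nb ∈ path then
        pvDfsALoop graph end_ maxPaths rest path acc (fun x hx => h x (List.mem_cons_of_mem _ hx))
      else
        pvDfsALoop graph end_ maxPaths rest path
          (pvDfsA graph end_ maxPaths nb (path ++ [nb]) acc)
          (fun x hx => h x (List.mem_cons_of_mem _ hx))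
termination_by (((pvTgts graph).filter (fun x => x ∉ path)).length, 0, nbs.length)
decreasing_by
  · exact Prod.Lex.right _ (Prod.Lex.right _ (by simp))
  · exact Prod.Lex.left _ _ (pv_filter_lt (h nb (List.mem_cons_self)) (by assumption))
  · exact Prod.Lex.right _ (Prod.Lex.right _ (by simp))
end

def find_critical_nodes (graph : List (String × List String)) (start : String) (end_ : String) : List String :=
  let all_paths := pvDfsA graph end_ none start [start] []
  match all_paths with
  | [] => PySem.Set.empty
  | p0 :: rest =>
      rest.foldl (fun critical path => PySem.Set.inter critical (PySem.Set.ofList path))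
        (PySem.Set.ofList p0)

-- ===== PORT B =====
mutual
-- dfs of _first_path: returns the first simple path found, None if none exists
def pvDfsF (graph : List (String × List String)) (end_ : String)
    (node : String) (path : List String) : Option (List String) :=
  if node = end_ then some path
  else pvDfsFLoop graph end_ (pvAdj graph node) path (pvAdj_subset_tgts graph node)
termination_by (((pvTgts graph).filter (fun x => x ∉ path)).length, 1, 0)
decreasing_by
  exact Prod.Lex.right _ (Prod.Lex.left _ _ (by omega))

def pvDfsFLoop (graph : List (String × List String)) (end_ : String)
    (nbs : List String) (path : List String)
    (h : ∀ x ∈ nbs, x ∈ pvTgts graph) : Option (List String) :=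
  match nbs with
  | [] => none
  | nb :: rest =>
      if nb ∈ path then
        pvDfsFLoop graph end_ rest path (fun x hx => h x (List.mem_cons_of_mem _ hx))
      else
        match pvDfsF graph end_ nb (path ++ [nb]) with
        | some found => some found
        | none => pvDfsFLoop graph end_ rest path (fun x hx => h x (List.mem_cons_of_mem _ hx))
termination_by (((pvTgts graph).filter (fun x => x ∉ path)).length, 0, nbs.length)
decreasing_by
  · exact Prod.Lex.right _ (Prod.Lex.right _ (by simp))
  · exact Prod.Lex.left _ _ (pv_filter_lt (h nb (List.mem_cons_self)) (by assumption))
  · exact Prod.Lex.right _ (Prod.Lex.right _ (by simp))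
end

def pvFirstPath (graph : List (String × List String)) (start : String) (end_ : String) :
    Option (List String) :=
  pvDfsF graph end_ start [start]

-- all dict keys and all neighbour entries (termination measure of the BFS only)
def pvUniv (graph : List (String × List String)) : List String :=
  PySem.List.dedup (graph.map Prod.fst ++ pvTgts graph)

theorem pvAdj_nil_of_not_key (graph : List (String × List String)) (n : String)
    (h : n ∉ graph.map Prod.fst) : pvAdj graph n = [] := by
  unfold pvAdj PySem.Dict.getD PySem.Dict.get?
  have : List.find? (fun p => p.1 == n) (PySem.Dict.mk graph).items = none := by
    apply List.find?_eq_none.2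
    intro p hp hbeq
    exact h (List.mem_map.2 ⟨p, hp, by simpa using hbeq⟩)
  simp [this]

theorem pvAdj_length_le (graph : List (String × List String)) (n : String) :
    (pvAdj graph n).length ≤ (pvTgts graph).length := by
  unfold pvAdj PySem.Dict.getD PySem.Dict.get?
  cases hfind : List.find? (fun p => p.1 == n) (PySem.Dict.mk graph).items with
  | none => simp
  | some pr =>
      simp only [Option.map_some, Option.getD_some]
      have hmem : pr ∈ graph := List.mem_of_find?_eq_some hfind
      unfold pvTgts
      rw [List.length_flatten]
      calc pr.2.length = (pr.2.length :: []).sum := by simp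
        _ ≤ ((graph.map Prod.snd).map List.length).sum := by
            apply List.Sublist.sum_le_sum
            · exact (List.singleton_sublist.2 (by
                exact List.mem_map.2 ⟨pr.2, List.mem_map.2 ⟨pr, hmem, rfl⟩, rfl⟩))
            · intro x hx; positivity

theorem pv_filter_len_lt {α : Type} (l : List α) (p q : α → Bool)
    (himp : ∀ x, q x = true → p x = true) (n : α) (hn : n ∈ l)
    (hp : p n = true) (hq : q n = false) :
    (l.filter q).length < (l.filter p).length := by
  have hsub : (l.filter q).Sublist (l.filter p) := List.monotone_filter_right l himp
  rcases Nat.lt_or_ge (l.filter q).length (l.filter p).length with h | h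
  · exact h
  · exfalso
    have heq := hsub.eq_of_length (Nat.le_antisymm hsub.length_le h)
    have h1 : n ∈ l.filter p := List.mem_filter.2 ⟨hn, hp⟩
    rw [← heq] at h1
    have := (List.mem_filter.1 h1).2
    rw [hq] at this
    exact Bool.false_ne_true this

-- the while-loop of _reachable_avoiding (queue.pop(0) BFS with a visited set)
def pvReachGo (graph : List (String × List String)) (end_ banned : String)
    (visited : PySem.Set String) (queue : List String) : Bool :=
  match queue with
  | [] => false
  | n :: rest =>
      if n = end_ then true
      else if n ∈ visited ∨ n = banned then pvReachGo graph end_ banned visited rest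
      else pvReachGo graph end_ banned (PySem.Set.add visited n) (rest ++ pvAdj graph n)
termination_by
  ((pvUniv graph).filter (fun x => x ∉ visited)).length * ((pvTgts graph).length + 1)
    + queue.length
decreasing_by
  · simp
  · rename_i _ hnv
    have hnvis : n ∉ visited := fun hc => hnv (Or.inl hc)
    have hadd : PySem.Set.add visited n = visited ++ [n] := by
      simp [PySem.Set.add, PySem.Set.contains, hnvis]
    rw [hadd]
    simp only [List.length_append, List.length_cons]
    by_cases hu : n ∈ pvUniv graph
    · have hlt : (List.filter (fun x => decide (x ∉ visited ++ [n])) (pvUniv graph)).length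
          < (List.filter (fun x => decide (x ∉ visited)) (pvUniv graph)).length := by
        apply pv_filter_len_lt _ _ _ _ n hu <;>
          first
            | (intro x hx
               simp only [decide_eq_true_eq, List.mem_append, List.mem_singleton] at hx ⊢
               exact fun h => hx (Or.inl h))
            | simp [hnvis]
      have hadj : (pvAdj graph n).length ≤ (pvTgts graph).length := pvAdj_length_le graph n
      have hmul : (List.filter (fun x => decide (x ∉ visited ++ [n])) (pvUniv graph)).length
            * ((pvTgts graph).length + 1) + ((pvTgts graph).length + 1)
          ≤ (List.filter (fun x => decide (x ∉ visited)) (pvUniv graph)).length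
            * ((pvTgts graph).length + 1) := by
        calc (List.filter (fun x => decide (x ∉ visited ++ [n])) (pvUniv graph)).length
              * ((pvTgts graph).length + 1) + ((pvTgts graph).length + 1)
            = ((List.filter (fun x => decide (x ∉ visited ++ [n])) (pvUniv graph)).length + 1)
              * ((pvTgts graph).length + 1) := by ring
          _ ≤ _ := Nat.mul_le_mul_right _ (Nat.succ_le_of_lt hlt)
      omega
    · have hkey : pvAdj graph n = [] := by
        apply pvAdj_nil_of_not_key
        intro hk
        exact hu (by
          unfold pvUniv
          rw [PySem.List.dedup_eq_ofList, PySem.Set.mem_ofList]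
          exact List.mem_append.2 (Or.inl hk))
      have hfe : List.filter (fun x => decide (x ∉ visited ++ [n])) (pvUniv graph)
          = List.filter (fun x => decide (x ∉ visited)) (pvUniv graph) := by
        apply List.filter_congr
        intro x hx
        have hxn : x ≠ n := fun hc => hu (hc ▸ hx)
        simp [hxn]
      rw [hfe, hkey]
      simp

def pvReach (graph : List (String × List String)) (start end_ banned : String) : Bool :=
  pvReachGo graph end_ banned PySem.Set.empty [start]

def find_critical_nodes_alt (graph : List (String × List String)) (start : String) (end_ : String) : List String :=
  match pvFirstPath graph start end_ with
  | none => PySem.Set.empty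
  | some path =>
      path.foldl (fun critical node =>
        if node = start ∨ node = end_ ∨ pvReach graph start end_ node = false
        then PySem.Set.add critical node else critical) PySem.Set.empty

-- ===== PRECONDITION & SPEC =====
def Spec_find_critical_nodes (graph : List (String × List String)) (start : String) (end_ : String) (out : List String) : Prop := out = find_critical_nodes_alt graph start end_
instance (graph : List (String × List String)) (start : String) (end_ : String) (out : List String) : Decidable (Spec_find_critical_nodes graph start end_ out) := by unfold Spec_find_critical_nodes; infer_instance

-- ===== CLAIM (what is proved, stated in full; the proofs are below) =====
def Claim_equal_find_critical_nodes : Prop := ∀ (graph : List (String × List String)) (start : String) (end_ : String), Dom_find_critical_nodes graph start end_ → Spec_find_critical_nodes graph start end_ (find_critical_nodes graph start end_)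

-- ===== LEMMAS AND PROOFS =====

-- remaining unvisited-target count: the DFS termination measure
def pvF (graph : List (String × List String)) (path : List String) : Nat :=
  ((pvTgts graph).filter (fun x => x ∉ path)).length

-- the pure value of A's dfs (accumulator removed)
def pvPaths (graph : List (String × List String)) (end_ node : String) (path : List String) :
    List (List String) :=
  pvDfsA graph end_ none node path []

def pvEdge (graph : List (String × List String)) (a b : String) : Prop := b ∈ pvAdj graph a

def pvStep (graph : List (String × List String)) (v a b : String) : Prop :=
  a ≠ v ∧ b ≠ v ∧ b ∈ pvAdj graph a

-- acc-normalization: the threaded all_paths accumulator only ever grows at the end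
theorem pvDfsA_acc (k : Nat) (graph : List (String × List String)) (end_ : String) :
    ∀ path : List String, pvF graph path ≤ k →
      (∀ node acc, pvDfsA graph end_ none node path acc
          = acc ++ pvDfsA graph end_ none node path []) ∧
      (∀ nbs h acc, pvDfsALoop graph end_ none nbs path acc h
          = acc ++ pvDfsALoop graph end_ none nbs path [] h) := by
  induction k using Nat.strong_induction_on with
  | _ k ih =>
    intro path hk
    have hloop : ∀ (nbs : List String) h (acc : List (List String)),
        pvDfsALoop graph end_ none nbs path acc h
          = acc ++ pvDfsALoop graph end_ none nbs path [] h := by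
      intro nbs
      induction nbs with
      | nil =>
          intro h acc
          rw [pvDfsALoop, pvDfsALoop]
          exact (List.append_nil acc).symm
      | cons nb rest ihn =>
          intro h acc
          rw [pvDfsALoop]
          conv_rhs => rw [pvDfsALoop]
          by_cases hmem : nb ∈ path
          · simp only [hmem, if_pos]
            exact ihn _ _
          · simp only [hmem, if_false]
            rw [ihn _ (pvDfsA graph end_ none nb (path ++ [nb]) acc)]
            rw [ihn _ (pvDfsA graph end_ none nb (path ++ [nb]) [])]
            have hlt : pvF graph (path ++ [nb]) < pvF graph path :=
              pv_filter_lt (h nb List.mem_cons_self) hmem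
            have hA := (ih (pvF graph (path ++ [nb])) (lt_of_lt_of_le hlt hk)
              (path ++ [nb]) le_rfl).1 nb acc
            rw [hA, List.append_assoc]
    refine ⟨?_, hloop⟩
    intro node acc
    rw [pvDfsA]
    conv_rhs => rw [pvDfsA]
    by_cases hne : node = end_
    · simp [hne]
    · simp only [hne, if_false]
      exact hloop _ _ acc

-- membership characterization of A's dfs: exactly the simple extensions of `path` to end_
theorem pvPaths_mem (k : Nat) (graph : List (String × List String)) (end_ : String) :
    ∀ path node, pvF graph path ≤ k → path ≠ [] → path.Nodup →
      path.getLast? = some node → (end_ ∈ path → node = end_) →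
      ∀ p, p ∈ pvPaths graph end_ node path ↔
        ∃ q, p = path ++ q ∧ List.IsChain (pvEdge graph) (node :: q) ∧
          (path ++ q).Nodup ∧ (path ++ q).getLast? = some end_ := by
  induction k using Nat.strong_induction_on with
  | _ k ih =>
    intro path node hk hpne hnd hlast hend p
    have hsimp : pvPaths graph end_ node path =
        if node = end_ then [path]
        else pvDfsALoop graph end_ none (pvAdj graph node) path []
          (pvAdj_subset_tgts graph node) := by
      unfold pvPaths
      rw [pvDfsA]
      simp
    rw [hsimp]
    by_cases hne : node = end_
    · rw [if_pos hne]
      simp only [List.mem_singleton]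
      constructor
      · rintro rfl
        exact ⟨[], by simp, List.isChain_singleton node,
          by simpa using hnd, by rw [List.append_nil, hlast, hne]⟩
      · rintro ⟨q, rfl, hch, hndq, hlastq⟩
        cases q with
        | nil => simp
        | cons b t =>
            exfalso
            have hmem_e_path : end_ ∈ path := hne ▸ List.mem_of_getLast? hlast
            have hlq : (b :: t).getLast? = some end_ := by
              rw [List.getLast?_append] at hlastq
              cases hbt : (b :: t).getLast? with
              | none => simp at hbt
              | some z => rw [hbt] at hlastq; simpa using hlastq
            have hmem_e_q : end_ ∈ b :: t := List.mem_of_getLast? hlq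
            have hdis := (List.nodup_append.1 hndq).2.2
            exact (hdis end_ hmem_e_path end_ hmem_e_q) rfl
    · rw [if_neg hne]
      have hloopmem : ∀ (nbs : List String) h,
          p ∈ pvDfsALoop graph end_ none nbs path [] h ↔
            ∃ nb ∈ nbs, nb ∉ path ∧ p ∈ pvPaths graph end_ nb (path ++ [nb]) := by
        intro nbs
        induction nbs with
        | nil => intro h; rw [pvDfsALoop]; simp
        | cons nb rest ihn =>
            intro h
            rw [pvDfsALoop]
            by_cases hmem : nb ∈ path
            · rw [if_pos hmem, ihn]
              constructor
              · rintro ⟨x, hx, hxp, hp⟩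
                exact ⟨x, List.mem_cons_of_mem _ hx, hxp, hp⟩
              · rintro ⟨x, hx, hxp, hp⟩
                rcases List.mem_cons.1 hx with rfl | hx2
                · exact absurd hmem hxp
                · exact ⟨x, hx2, hxp, hp⟩
            · rw [if_neg hmem]
              rw [(pvDfsA_acc (pvF graph path) graph end_ path le_rfl).2 rest _
                (pvDfsA graph end_ none nb (path ++ [nb]) [])]
              rw [List.mem_append, ihn]
              constructor
              · rintro (hp | ⟨x, hx, hxp, hp⟩)
                · exact ⟨nb, List.mem_cons_self, hmem, hp⟩
                · exact ⟨x, List.mem_cons_of_mem _ hx, hxp, hp⟩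
              · rintro ⟨x, hx, hxp, hp⟩
                rcases List.mem_cons.1 hx with rfl | hx2
                · exact Or.inl hp
                · exact Or.inr ⟨x, hx2, hxp, hp⟩
      rw [hloopmem _ _]
      have hrec : ∀ nb, nb ∈ pvAdj graph node → nb ∉ path → ∀ p',
          p' ∈ pvPaths graph end_ nb (path ++ [nb]) ↔
            ∃ q', p' = (path ++ [nb]) ++ q' ∧ List.IsChain (pvEdge graph) (nb :: q') ∧
              ((path ++ [nb]) ++ q').Nodup ∧ ((path ++ [nb]) ++ q').getLast? = some end_ := by
        intro nb hadj hnbp p'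
        have hlt : pvF graph (path ++ [nb]) < pvF graph path :=
          pv_filter_lt (pvAdj_subset_tgts graph node nb hadj) hnbp
        have hndp : (path ++ [nb]).Nodup := by
          rw [List.nodup_append]
          refine ⟨hnd, List.nodup_singleton nb, ?_⟩
          intro a ha b hb
          simp only [List.mem_singleton] at hb
          subst hb
          exact fun hc => hnbp (hc ▸ ha)
        have hende : end_ ∈ path ++ [nb] → nb = end_ := by
          intro hm
          rcases List.mem_append.1 hm with hm1 | hm1
          · exact absurd (hend hm1) hne
          · simp only [List.mem_singleton] at hm1
            exact hm1.symm
        exact ih _ (lt_of_lt_of_le hlt hk) (path ++ [nb]) nb le_rfl (by simp)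
          hndp List.getLast?_concat hende p'
      constructor
      · rintro ⟨nb, hnbadj, hnbp, hp⟩
        rw [hrec nb hnbadj hnbp p] at hp
        obtain ⟨q', rfl, hch, hndq, hlq⟩ := hp
        refine ⟨nb :: q', by simp, ?_, by simpa using hndq, by simpa using hlq⟩
        rw [List.isChain_cons_cons]
        exact ⟨hnbadj, hch⟩
      · rintro ⟨q, rfl, hch, hndq, hlq⟩
        cases q with
        | nil =>
            exfalso
            rw [List.append_nil, hlast] at hlq
            simp only [Option.some.injEq] at hlq
            exact hne hlq
        | cons nb q' =>
            have hedge : pvEdge graph node nb := (List.isChain_cons_cons.1 hch).1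
            have hch2 := (List.isChain_cons_cons.1 hch).2
            have hnbp : nb ∉ path := by
              have hdis := (List.nodup_append.1 hndq).2.2
              intro hc
              exact (hdis nb hc nb List.mem_cons_self) rfl
            refine ⟨nb, hedge, hnbp, ?_⟩
            rw [hrec nb hedge hnbp]
            exact ⟨q', by simp, hch2, by simpa using hndq, by simpa using hlq⟩

-- B's first-path dfs returns the head of A's enumeration
theorem pvDfsF_eq (k : Nat) (graph : List (String × List String)) (end_ : String) :
    ∀ path node, pvF graph path ≤ k →
      pvDfsF graph end_ node path = (pvPaths graph end_ node path).head? := by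
  induction k using Nat.strong_induction_on with
  | _ k ih =>
    intro path node hk
    have hsimp : pvPaths graph end_ node path =
        if node = end_ then [path]
        else pvDfsALoop graph end_ none (pvAdj graph node) path []
          (pvAdj_subset_tgts graph node) := by
      unfold pvPaths
      rw [pvDfsA]
      simp
    rw [pvDfsF, hsimp]
    by_cases hne : node = end_
    · rw [if_pos hne, if_pos hne]
      rfl
    · rw [if_neg hne, if_neg hne]
      have hloop : ∀ (nbs : List String) h,
          pvDfsFLoop graph end_ nbs path h
            = (pvDfsALoop graph end_ none nbs path [] h).head? := by
        intro nbs
        induction nbs with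
        | nil => intro h; rw [pvDfsFLoop, pvDfsALoop]; rfl
        | cons nb rest ihn =>
            intro h
            rw [pvDfsFLoop, pvDfsALoop]
            by_cases hmem : nb ∈ path
            · rw [if_pos hmem, if_pos hmem, ihn]
            · rw [if_neg hmem, if_neg hmem]
              rw [(pvDfsA_acc (pvF graph path) graph end_ path le_rfl).2 rest _
                (pvDfsA graph end_ none nb (path ++ [nb]) [])]
              rw [List.head?_append]
              have hF := ih _ (lt_of_lt_of_le
                  (pv_filter_lt (h nb List.mem_cons_self) hmem) hk)
                (path ++ [nb]) nb le_rfl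
              rw [hF]
              unfold pvPaths
              cases hp : pvDfsA graph end_ none nb (path ++ [nb]) [] with
              | nil =>
                  simp only [List.head?_nil, Option.none_or]
                  exact ihn _
              | cons p0 ps => simp
      exact hloop _ _

theorem pv_rtg_closed {α : Type} {r : α → α → Prop} {S : List α}
    (hcl : ∀ a ∈ S, ∀ b, r a b → b ∈ S) {x y : α}
    (hx : x ∈ S) (h : Relation.ReflTransGen r x y) : y ∈ S := by
  induction h with
  | refl => exact hx
  | tail _ hstep ih => exact hcl _ ih _ hstep

theorem pvReachGo_true (graph : List (String × List String)) (start end_ v : String)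
    (he : end_ ≠ v) :
    ∀ visited queue,
      (∀ x ∈ queue, x = v ∨ Relation.ReflTransGen (pvStep graph v) start x) →
      pvReachGo graph end_ v visited queue = true →
      Relation.ReflTransGen (pvStep graph v) start end_ := by
  intro visited queue
  induction visited, queue using pvReachGo.induct graph end_ v with
  | case1 visited =>
      intro _ hrun
      rw [pvReachGo] at hrun
      cases hrun
  | case2 visited rest =>
      intro hq _
      rcases hq end_ List.mem_cons_self with hv | hv
      · exact absurd hv he
      · exact hv
  | case3 visited n rest hne hmem ihr =>
      intro hq hrun
      rw [pvReachGo, if_neg hne, if_pos hmem] at hrun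
      exact ihr (fun x hx => hq x (List.mem_cons_of_mem _ hx)) hrun
  | case4 visited n rest hne hnv ihr =>
      intro hq hrun
      rw [pvReachGo, if_neg hne, if_neg hnv] at hrun
      have hnv2 : n ≠ v := fun hc => hnv (Or.inr hc)
      have hn : Relation.ReflTransGen (pvStep graph v) start n := by
        rcases hq n List.mem_cons_self with hv | hv
        · exact absurd hv hnv2
        · exact hv
      apply ihr ?_ hrun
      intro x hx
      rcases List.mem_append.1 hx with hx1 | hx1
      · exact hq x (List.mem_cons_of_mem _ hx1)
      · by_cases hxv : x = v
        · exact Or.inl hxv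
        · exact Or.inr (hn.tail ⟨hnv2, hxv, hx1⟩)

theorem pvReachGo_false (graph : List (String × List String)) (end_ v : String)
    (he : end_ ≠ v) :
    ∀ visited queue,
      (∀ a ∈ visited, a ≠ end_ ∧ a ≠ v ∧
        ∀ b, pvStep graph v a b → b ∈ visited ∨ b ∈ queue) →
      pvReachGo graph end_ v visited queue = false →
      ∀ x, (x ∈ visited ∨ x ∈ queue) →
        ∀ y, Relation.ReflTransGen (pvStep graph v) x y → y ≠ end_ := by
  intro visited queue
  induction visited, queue using pvReachGo.induct graph end_ v with
  | case1 visited =>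
      intro hv _ x hx y hy
      rcases hx with hx | hx
      · have hcl : ∀ a ∈ visited, ∀ b, pvStep graph v a b → b ∈ visited := by
          intro a ha b hb
          rcases (hv a ha).2.2 b hb with hb1 | hb1
          · exact hb1
          · cases hb1
        exact (hv y (pv_rtg_closed hcl hx hy)).1
      · cases hx
  | case2 visited rest =>
      intro _ hrun
      rw [pvReachGo] at hrun
      simp at hrun
  | case3 visited n rest hne hmem ihr =>
      intro hv hrun x hx y hy
      rw [pvReachGo, if_neg hne, if_pos hmem] at hrun
      have hv2 : ∀ a ∈ visited, a ≠ end_ ∧ a ≠ v ∧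
          ∀ b, pvStep graph v a b → b ∈ visited ∨ b ∈ rest := by
        intro a ha
        obtain ⟨h1, h2, h3⟩ := hv a ha
        refine ⟨h1, h2, fun b hb => ?_⟩
        rcases h3 b hb with hb1 | hb1
        · exact Or.inl hb1
        · rcases List.mem_cons.1 hb1 with rfl | hb2
          · rcases hmem with hm | hm
            · exact Or.inl hm
            · exact absurd hm hb.2.1
          · exact Or.inr hb2
      rcases hx with hx | hx
      · exact ihr hv2 hrun x (Or.inl hx) y hy
      · rcases List.mem_cons.1 hx with rfl | hx2
        · rcases hmem with hm | hm
          · exact ihr hv2 hrun x (Or.inl hm) y hy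
          · subst hm
            rcases hy.cases_head with rfl | ⟨c, hstep, _⟩
            · exact fun hc => he hc.symm
            · exact absurd rfl hstep.1
        · exact ihr hv2 hrun x (Or.inr hx2) y hy
  | case4 visited n rest hne hnv ihr =>
      intro hv hrun x hx y hy
      rw [pvReachGo, if_neg hne, if_neg hnv] at hrun
      have hnvis : n ∉ visited := fun hc => hnv (Or.inl hc)
      have hnv2 : n ≠ v := fun hc => hnv (Or.inr hc)
      have hadd : PySem.Set.add visited n = visited ++ [n] := by
        simp [PySem.Set.add, PySem.Set.contains, hnvis]
      have hv2 : ∀ a ∈ PySem.Set.add visited n, a ≠ end_ ∧ a ≠ v ∧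
          ∀ b, pvStep graph v a b → b ∈ PySem.Set.add visited n ∨ b ∈ rest ++ pvAdj graph n := by
        rw [hadd]
        intro a ha
        rcases List.mem_append.1 ha with ha1 | ha1
        · obtain ⟨h1, h2, h3⟩ := hv a ha1
          refine ⟨h1, h2, fun b hb => ?_⟩
          rcases h3 b hb with hb1 | hb1
          · exact Or.inl (List.mem_append.2 (Or.inl hb1))
          · rcases List.mem_cons.1 hb1 with rfl | hb2
            · exact Or.inl (List.mem_append.2 (Or.inr List.mem_cons_self))
            · exact Or.inr (List.mem_append.2 (Or.inl hb2))
        · simp only [List.mem_singleton] at ha1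
          subst ha1
          exact ⟨hne, hnv2, fun b hb => Or.inr (List.mem_append.2 (Or.inr hb.2.2))⟩
      apply ihr hv2 hrun x ?_ y hy
      rcases hx with hx | hx
      · exact Or.inl (by rw [hadd]; exact List.mem_append.2 (Or.inl hx))
      · rcases List.mem_cons.1 hx with rfl | hx2
        · exact Or.inl (by rw [hadd]; exact List.mem_append.2 (Or.inr List.mem_cons_self))
        · exact Or.inr (List.mem_append.2 (Or.inl hx2))

theorem pvReach_iff (graph : List (String × List String)) (start end_ v : String)
    (hs : start ≠ v) (he : end_ ≠ v) :
    pvReach graph start end_ v = true ↔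
      Relation.ReflTransGen (pvStep graph v) start end_ := by
  constructor
  · intro h
    refine pvReachGo_true graph start end_ v he PySem.Set.empty [start] ?_ h
    intro x hx
    simp only [List.mem_singleton] at hx
    subst hx
    exact Or.inr Relation.ReflTransGen.refl
  · intro h
    by_contra hfalse
    have hrun : pvReach graph start end_ v = false := by
      cases hb : pvReach graph start end_ v
      · rfl
      · exact absurd hb hfalse
    exact pvReachGo_false graph end_ v he PySem.Set.empty [start]
      (by intro a ha; cases ha) hrun start (Or.inr List.mem_cons_self) end_ h rfl

theorem pv_chain_last_rtg {α : Type} {r : α → α → Prop} :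
    ∀ (q : List α) (a e : α), List.IsChain r (a :: q) → (a :: q).getLast? = some e →
      Relation.ReflTransGen r a e := by
  intro q
  induction q with
  | nil =>
      intro a e _ hl
      simp only [List.getLast?_singleton, Option.some.injEq] at hl
      exact hl ▸ Relation.ReflTransGen.refl
  | cons b t ih =>
      intro a e hch hl
      rw [List.isChain_cons_cons] at hch
      exact Relation.ReflTransGen.head hch.1
        (ih b e hch.2 (by rw [← List.getLast?_cons_cons]; exact hl))

theorem pv_rtg_chain {α : Type} {r : α → α → Prop} {a e : α}
    (h : Relation.ReflTransGen r a e) :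
    ∃ q, List.IsChain r (a :: q) ∧ (a :: q).getLast? = some e := by
  induction h with
  | refl => exact ⟨[], List.isChain_singleton a, by simp⟩
  | @tail b c _ hstep ih =>
      obtain ⟨q, hch, hl⟩ := ih
      refine ⟨q ++ [c], ?_, ?_⟩
      · rw [show a :: (q ++ [c]) = (a :: q) ++ [c] from by simp]
        rw [List.isChain_append]
        refine ⟨hch, List.isChain_singleton c, ?_⟩
        intro x hx y hy
        rw [hl] at hx
        simp only [Option.mem_def, Option.some.injEq, List.head?_cons] at hx hy
        exact hx ▸ hy ▸ hstep
      · rw [show a :: (q ++ [c]) = (a :: q) ++ [c] from by simp]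
        exact List.getLast?_concat

theorem pv_last_occ {α : Type} {a : α} : ∀ (l : List α), a ∈ l →
    ∃ l₁ l₂, l = l₁ ++ a :: l₂ ∧ a ∉ l₂ := by
  intro l h
  induction l with
  | nil => cases h
  | cons b t ih =>
      by_cases hat : a ∈ t
      · obtain ⟨l₁, l₂, he, hn⟩ := ih hat
        exact ⟨b :: l₁, l₂, by rw [List.cons_append, ← he], hn⟩
      · have hab : a = b := by
          rcases List.mem_cons.1 h with hc | hc
          · exact hc
          · exact absurd hc hat
        exact ⟨[], t, by rw [hab]; rfl, hab ▸ hat⟩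

-- loop erasure: a walk contains a duplicate-free walk with the same endpoints
theorem pv_shorten {α : Type} [DecidableEq α] {r : α → α → Prop} :
    ∀ (n : Nat) (l : List α) (a e : α), l.length ≤ n →
      List.IsChain r (a :: l) → (a :: l).getLast? = some e →
      ∃ l', List.IsChain r (a :: l') ∧ (a :: l').getLast? = some e ∧
        (a :: l').Nodup ∧ ∀ x ∈ l', x ∈ l := by
  intro n
  induction n with
  | zero =>
      intro l a e hl hch hlast
      have hnil : l = [] := List.eq_nil_of_length_eq_zero (Nat.le_zero.1 hl)
      subst hnil
      exact ⟨[], hch, hlast, List.nodup_singleton a, by simp⟩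
  | succ n ih =>
      intro l a e hl hch hlast
      by_cases hal : a ∈ l
      · obtain ⟨l₁, l₂, rfl, hnl₂⟩ := pv_last_occ _ hal
        have hsplit : a :: (l₁ ++ a :: l₂) = (a :: l₁) ++ (a :: l₂) := by simp
        have hsuf : List.IsChain r (a :: l₂) :=
          hch.suffix ⟨a :: l₁, hsplit.symm⟩
        have hlast₂ : (a :: l₂).getLast? = some e := by
          rw [hsplit, List.getLast?_append] at hlast
          cases h2 : (a :: l₂).getLast? with
          | none => simp at h2
          | some z => rw [h2] at hlast; simpa using hlast
        have hlen : l₂.length ≤ n := by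
          have := hl; simp only [List.length_append, List.length_cons] at this; omega
        obtain ⟨l2, h1, h2, h3, h4⟩ := ih l₂ a e hlen hsuf hlast₂
        exact ⟨l2, h1, h2, h3, fun x hx => by
          simp only [List.mem_append, List.mem_cons]
          exact Or.inr (Or.inr (h4 x hx))⟩
      · cases l with
        | nil =>
            exact ⟨[], hch, hlast, List.nodup_singleton a, by simp⟩
        | cons b t =>
            have hrab : r a b := (List.isChain_cons_cons.1 hch).1
            have hcht : List.IsChain r (b :: t) := (List.isChain_cons_cons.1 hch).2
            have hlen : t.length ≤ n := by
              simp only [List.length_cons] at hl; omega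
            obtain ⟨l2, h1, h2, h3, h4⟩ := ih t b e hlen hcht
              (by rw [← List.getLast?_cons_cons]; exact hlast)
            refine ⟨b :: l2, List.isChain_cons_cons.2 ⟨hrab, h1⟩, ?_, ?_, ?_⟩
            · rw [List.getLast?_cons_cons]; exact h2
            · refine List.nodup_cons.2 ⟨?_, h3⟩
              intro hc
              rcases List.mem_cons.1 hc with hm | hm
              · exact hal (hm ▸ List.mem_cons_self)
              · exact hal (List.mem_cons_of_mem _ (h4 _ hm))
            · intro x hx
              rcases List.mem_cons.1 hx with hm | hm
              · exact hm ▸ List.mem_cons_self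
              · exact List.mem_cons_of_mem _ (h4 _ hm)

-- every node a pvStep-walk visits after its start differs from v
theorem pv_step_tail_ne (graph : List (String × List String)) (v : String) :
    ∀ (l : List String) (a : String), List.IsChain (pvStep graph v) (a :: l) →
      ∀ x ∈ l, x ≠ v := by
  intro l
  induction l with
  | nil => simp
  | cons b t ih =>
      intro a hch x hx
      rw [List.isChain_cons_cons] at hch
      rcases List.mem_cons.1 hx with hm | hm
      · exact hm ▸ hch.1.2.1
      · exact ih b hch.2 x hm

-- an edge-chain avoiding v is a pvStep-chain
theorem pv_chain_step_of_edge (graph : List (String × List String)) (v : String) :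
    ∀ (l : List String), List.IsChain (pvEdge graph) l → (∀ x ∈ l, x ≠ v) →
      List.IsChain (pvStep graph v) l := by
  intro l
  induction l with
  | nil => intro _ _; simp
  | cons a t ih =>
      intro hch hne
      cases t with
      | nil => simp
      | cons b t2 =>
          rw [List.isChain_cons_cons] at hch ⊢
          exact ⟨⟨hne a List.mem_cons_self, hne b (List.mem_cons_of_mem _ List.mem_cons_self), hch.1⟩,
            ih hch.2 (fun x hx => hne x (List.mem_cons_of_mem _ hx))⟩

-- A's intersection fold is a filter over the first path's distinct nodes
theorem pv_inter_fold (rest : List (List String)) :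
    ∀ c : PySem.Set String,
      rest.foldl (fun critical path => PySem.Set.inter critical (PySem.Set.ofList path)) c
        = c.filter (fun v => decide (∀ p ∈ rest, v ∈ p)) := by
  induction rest with
  | nil => intro c; simp
  | cons p rs ih =>
      intro c
      rw [List.foldl_cons, ih]
      show (PySem.Set.inter c (PySem.Set.ofList p)).filter _ = _
      unfold PySem.Set.inter
      rw [List.filter_filter]
      apply List.filter_congr
      intro x _
      simp [PySem.Set.contains, PySem.Set.mem_ofList, Bool.and_comm]

-- B's conditional-add fold is set(filter(cond, l))
theorem pv_fold_condAdd (P : String → Prop) [DecidablePred P] :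
    ∀ (l : List String) (acc : PySem.Set String),
      l.foldl (fun critical node => if P node then PySem.Set.add critical node else critical) acc
        = (l.filter (fun v => decide (P v))).foldl PySem.Set.add acc := by
  intro l
  induction l with
  | nil => intro acc; rfl
  | cons x t ih =>
      intro acc
      by_cases hx : P x
      · simp [hx, ih]
      · simp [hx, ih]

theorem pv_ofList_filter (q : String → Bool) :
    ∀ l : List String, PySem.Set.ofList (l.filter q) = (PySem.Set.ofList l).filter q := by
  intro l
  induction l using List.reverseRecOn with
  | nil => simp [PySem.Set.ofList]
  | append_singleton t x ih =>
      have hof : ∀ (m : List String) (y : String),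
          PySem.Set.ofList (m ++ [y]) = PySem.Set.add (PySem.Set.ofList m) y := by
        intro m y
        rw [PySem.Set.ofList_eq_foldl, PySem.Set.ofList_eq_foldl, List.foldl_append]
        rfl
      by_cases hq : q x
      · have hfx : (t ++ [x]).filter q = t.filter q ++ [x] := by
          rw [List.filter_append]; simp [hq]
        rw [hfx, hof, hof, ih]
        by_cases hxt : x ∈ t
        · have c1 : PySem.Set.contains ((PySem.Set.ofList t).filter q) x = true := by
            simp [PySem.Set.contains, List.mem_filter, PySem.Set.mem_ofList, hxt, hq]
          have c2 : PySem.Set.contains (PySem.Set.ofList t) x = true := by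
            simp [PySem.Set.contains, PySem.Set.mem_ofList, hxt]
          simp only [PySem.Set.add, c1, c2, if_pos]
        · have c1 : PySem.Set.contains ((PySem.Set.ofList t).filter q) x = false := by
            simp [PySem.Set.contains, List.mem_filter, PySem.Set.mem_ofList, hxt]
          have c2 : PySem.Set.contains (PySem.Set.ofList t) x = false := by
            simp [PySem.Set.contains, PySem.Set.mem_ofList, hxt]
          simp only [PySem.Set.add, c1, c2, Bool.false_eq_true, if_false]
          rw [List.filter_append]
          simp [hq]
      · have hfx : (t ++ [x]).filter q = t.filter q := by
          rw [List.filter_append]; simp [hq]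
        rw [hfx, hof, ih]
        by_cases hxt : x ∈ t
        · have c2 : PySem.Set.contains (PySem.Set.ofList t) x = true := by
            simp [PySem.Set.contains, PySem.Set.mem_ofList, hxt]
          simp only [PySem.Set.add, c2, if_pos]
        · have c2 : PySem.Set.contains (PySem.Set.ofList t) x = false := by
            simp [PySem.Set.contains, PySem.Set.mem_ofList, hxt]
          simp only [PySem.Set.add, c2, Bool.false_eq_true, if_false]
          rw [List.filter_append]
          simp [hq]

theorem pv_main (graph : List (String × List String)) (start end_ : String) :
    find_critical_nodes graph start end_ = find_critical_nodes_alt graph start end_ := by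
  have hfp : pvFirstPath graph start end_ = (pvPaths graph end_ start [start]).head? := by
    unfold pvFirstPath
    exact pvDfsF_eq (pvF graph [start]) graph end_ [start] start le_rfl
  have hchar : ∀ p ∈ pvPaths graph end_ start [start],
      ∃ q, p = start :: q ∧ List.IsChain (pvEdge graph) (start :: q) ∧
        p.Nodup ∧ p.getLast? = some end_ := by
    intro p hp
    have hm := (pvPaths_mem (pvF graph [start]) graph end_ [start] start le_rfl (by simp)
      (List.nodup_singleton start) (by simp)
      (fun hm => (List.mem_singleton.1 hm).symm) p).1 hp
    obtain ⟨q, rfl, hch, hnd, hl⟩ := hm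
    exact ⟨q, by simp, hch, hnd, hl⟩
  have hcomp : ∀ q, List.IsChain (pvEdge graph) (start :: q) → (start :: q).Nodup →
      (start :: q).getLast? = some end_ →
      (start :: q) ∈ pvPaths graph end_ start [start] := by
    intro q hch hnd hl
    apply (pvPaths_mem (pvF graph [start]) graph end_ [start] start le_rfl (by simp)
      (List.nodup_singleton start) (by simp)
      (fun hm => (List.mem_singleton.1 hm).symm) (start :: q)).2
    exact ⟨q, by simp, hch, by simpa using hnd, by simpa using hl⟩
  simp only [find_critical_nodes, find_critical_nodes_alt]
  rw [hfp]
  have hPP : pvDfsA graph end_ none start [start] [] = pvPaths graph end_ start [start] := rfl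
  rw [hPP]
  cases hAP : pvPaths graph end_ start [start] with
  | nil => rfl
  | cons p0 rest =>
      simp only [List.head?_cons]
      rw [pv_inter_fold rest (PySem.Set.ofList p0)]
      rw [pv_fold_condAdd (fun node => node = start ∨ node = end_ ∨
        pvReach graph start end_ node = false) p0 PySem.Set.empty]
      rw [show (PySem.Set.empty : PySem.Set String) = ([] : List String) from rfl]
      rw [← PySem.Set.ofList_eq_foldl]
      rw [pv_ofList_filter]
      apply (List.filter_congr ?_).symm
      intro x hxof
      have hx : x ∈ p0 := (PySem.Set.mem_ofList p0 x).1 hxof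
      have hstart_mem : ∀ p ∈ pvPaths graph end_ start [start], start ∈ p ∧ end_ ∈ p := by
        intro p hp
        obtain ⟨q, rfl, _, _, hl⟩ := hchar p hp
        exact ⟨List.mem_cons_self, List.mem_of_getLast? hl⟩
      rw [decide_eq_decide]
      constructor
      · intro hC p hpr
        have hpAP : p ∈ pvPaths graph end_ start [start] := by
          rw [hAP]; exact List.mem_cons_of_mem _ hpr
        rcases hC with rfl | hC2
        · exact (hstart_mem p hpAP).1
        rcases hC2 with rfl | hreach
        · exact (hstart_mem p hpAP).2
        by_cases hxs : x = start
        · exact hxs ▸ (hstart_mem p hpAP).1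
        by_cases hxe : x = end_
        · exact hxe ▸ (hstart_mem p hpAP).2
        by_contra hxnp
        obtain ⟨q, rfl, hch, hnd, hl⟩ := hchar p hpAP
        have hstep : List.IsChain (pvStep graph x) (start :: q) :=
          pv_chain_step_of_edge graph x _ hch (fun z hz hc => hxnp (hc ▸ hz))
        have hrtg := pv_chain_last_rtg q start end_ hstep hl
        rw [← pvReach_iff graph start end_ x (fun hc => hxs hc.symm)
          (fun hc => hxe hc.symm)] at hrtg
        rw [hreach] at hrtg
        cases hrtg
      · intro hall
        by_cases hxs : x = start
        · exact Or.inl hxs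
        by_cases hxe : x = end_
        · exact Or.inr (Or.inl hxe)
        refine Or.inr (Or.inr ?_)
        cases hb : pvReach graph start end_ x with
        | false => rfl
        | true =>
            exfalso
            have hrtg := (pvReach_iff graph start end_ x (fun hc => hxs hc.symm)
              (fun hc => hxe hc.symm)).1 hb
            obtain ⟨w, hchW, hlW⟩ := pv_rtg_chain hrtg
            obtain ⟨l2, hch2, hl2, hnd2, hsub⟩ := pv_shorten w.length w start end_ le_rfl hchW hlW
            have hchE : List.IsChain (pvEdge graph) (start :: l2) :=
              hch2.imp (fun a b h => h.2.2)
            have hmem : (start :: l2) ∈ pvPaths graph end_ start [start] :=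
              hcomp l2 hchE hnd2 hl2
            have hxin : x ∈ start :: l2 := by
              rw [hAP] at hmem
              rcases List.mem_cons.1 hmem with heq | hr
              · rw [heq]; exact hx
              · exact hall _ hr
            rcases List.mem_cons.1 hxin with hfst | hx2
            · exact hxs hfst
            · exact (pv_step_tail_ne graph x l2 start hch2 x hx2) rfl


-- ===== VERDICT (by name: the statement is the Claim_ definition above) =====
theorem find_critical_nodes_spec : Claim_equal_find_critical_nodes := by
  intro graph start end_ _
  exact pv_main graph start end_
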